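-- pv_equiv track=rewrite | github.com/sjk7876/AdventOfCode2023 | day01.py | getNumForwardPartTwo
-- ===== SOURCE A (Python) =====
-- numbers = {'one': 1, 'two': 2, 'three': 3, 'four': 4, 'five': 5, 'six': 6, 'seven': 7, 'eight': 8, 'nine': 9}
--
-- def getNumForwardPartTwo(s):
--     first_index = len(s)
--     first_val = 0
--     for i in range (len(s)):
--         if s[i].isdigit():
--             first_index = i
--             first_val = int(s[i])
--             break
--
--     for num in numbers:
--         first_word = s.find(num)
--         if first_word != -1 and first_word < first_index:
--             first_index = first_word
--             first_val = numbers[num]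
--
--     return str(first_val)
-- ===== SOURCE B (Python) =====
-- numbers = {'one': 1, 'two': 2, 'three': 3, 'four': 4, 'five': 5, 'six': 6, 'seven': 7, 'eight': 8, 'nine': 9}
--
-- def getNumForwardPartTwo(s):
--     for i in range(len(s)):
--         if s[i].isdigit():
--             return str(int(s[i]))
--         for word, val in numbers.items():
--             if s.startswith(word, i):
--                 return str(val)
--     return '0'
-- ===== Notes on version B (the rewrite author's own statement) =====
-- stated objective: simpler
-- what changed: Replaces A's digit scan plus nine whole-string find passes with min-tracking by a single left-to-right positional scan that returns the first digit or spelled word found at each index.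
import Mathlib
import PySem

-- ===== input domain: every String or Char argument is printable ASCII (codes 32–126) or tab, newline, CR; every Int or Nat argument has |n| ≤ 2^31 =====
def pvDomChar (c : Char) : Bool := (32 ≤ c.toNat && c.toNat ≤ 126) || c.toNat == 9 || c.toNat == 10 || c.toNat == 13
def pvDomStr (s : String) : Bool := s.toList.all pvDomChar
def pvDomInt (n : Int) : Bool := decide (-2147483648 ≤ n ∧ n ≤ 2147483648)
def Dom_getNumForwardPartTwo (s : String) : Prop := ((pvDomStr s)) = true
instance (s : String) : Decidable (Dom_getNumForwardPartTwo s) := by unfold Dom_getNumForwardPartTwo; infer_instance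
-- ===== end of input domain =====

-- B replaces A's digit scan plus nine whole-string find passes by one left-to-right
-- positional scan returning the first match; objective: simpler.

-- ===== PORT A =====
-- the module-level dict 'numbers' (insertion order)
def numbersList : List (List Char × Int) :=
  [("one".toList, 1), ("two".toList, 2), ("three".toList, 3), ("four".toList, 4),
   ("five".toList, 5), ("six".toList, 6), ("seven".toList, 7), ("eight".toList, 8),
   ("nine".toList, 9)]

-- first loop of A: scan for the first digit, with break; int(s[i]) for an ASCII
-- digit (the Dom) is its code minus 48 — exact there
def digitScan : List Char → Int → Int × Int → Int × Int
  | [], _, dflt => dflt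
  | c :: rest, i, dflt =>
      if PySem.Chars.isdigit c then (i, (c.toNat : Int) - 48)
      else digitScan rest (i + 1) dflt

-- second loop of A: for each word, s.find(word), keep the strictly smaller index
def wordLoop (cs : List Char) : List (List Char × Int) → Int × Int → Int × Int
  | [], st => st
  | p :: ps, st =>
      let fw := PySem.Chars.find cs p.1
      wordLoop cs ps (if fw ≠ -1 ∧ fw < st.1 then (fw, p.2) else st)

def getNumForwardPartTwo (s : String) : String :=
  let cs := s.toList
  let st := wordLoop cs numbersList (digitScan cs 0 ((cs.length : Int), 0))
  PySem.Int.toStr st.2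

-- ===== PORT B =====
-- inner loop of B: first word of the dict that starts at this position
def wordAt : List (List Char × Int) → List Char → Option Int
  | [], _ => none
  | p :: ps, suf => if PySem.Chars.startswith suf p.1 then some p.2 else wordAt ps suf

-- outer loop of B: scan positions left to right (suffixes), return on first match
def bscan : List Char → String
  | [] => "0"
  | c :: rest =>
      if PySem.Chars.isdigit c then PySem.Int.toStr ((c.toNat : Int) - 48)
      else
        match wordAt numbersList (c :: rest) with
        | some v => PySem.Int.toStr v
        | none => bscan rest

def getNumForwardPartTwo_alt (s : String) : String := bscan s.toList

-- ===== PRECONDITION & SPEC =====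
def Spec_getNumForwardPartTwo (s : String) (out : String) : Prop := out = getNumForwardPartTwo_alt s
instance (s : String) (out : String) : Decidable (Spec_getNumForwardPartTwo s out) := by unfold Spec_getNumForwardPartTwo; infer_instance

-- ===== CLAIM (what is proved, stated in full; the proofs are below) =====
def Claim_equal_getNumForwardPartTwo : Prop := ∀ (s : String), Dom_getNumForwardPartTwo s → Spec_getNumForwardPartTwo s (getNumForwardPartTwo s)

-- ===== LEMMAS AND PROOFS =====

-- find points at the first occurrence: the characterisation as an equation
theorem find_eq_of {cs w : List Char} (j : Nat) (h1 : w <+: cs.drop j)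
    (h2 : ∀ i < j, ¬ w <+: cs.drop i) : PySem.Chars.find cs w = (j : Int) := by
  have hin : PySem.Chars.isIn w cs = true :=
    (PySem.Chars.exists_prefix_drop_iff_isIn w cs).mp ⟨j, h1⟩
  have h0 : 0 ≤ PySem.Chars.find cs w :=
    (PySem.Chars.find_nonneg_iff cs w).mpr ((PySem.Chars.isIn_iff_infix w cs).mp hin)
  obtain ⟨hpre, hmin⟩ := PySem.Chars.find_spec h0
  rcases lt_trichotomy ((PySem.Chars.find cs w).toNat) j with h | h | h
  · exact absurd hpre (h2 _ h)
  · omega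
  · exact absurd h1 (hmin _ h)

-- unfolding find over a cons
theorem findCons (c : Char) (cs w : List Char) :
    PySem.Chars.find (c :: cs) w =
      if PySem.Chars.startswith (c :: cs) w then 0
      else if PySem.Chars.find cs w = -1 then -1 else PySem.Chars.find cs w + 1 := by
  by_cases hsw : PySem.Chars.startswith (c :: cs) w
  · rw [if_pos hsw]
    have h1 : w <+: (c :: cs).drop 0 := (PySem.Chars.startswith_iff _ _).mp hsw
    have := find_eq_of 0 h1 (by intro i hi; omega)
    simpa using this
  · rw [if_neg hsw]
    by_cases hmiss : PySem.Chars.find cs w = -1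
    · rw [if_pos hmiss]
      rw [PySem.Chars.find_eq_neg_one_iff]
      intro hinf
      obtain ⟨j, hj⟩ := (PySem.Chars.exists_prefix_drop_iff_isIn w (c :: cs)).mpr
        ((PySem.Chars.isIn_iff_infix w (c :: cs)).mpr hinf)
      match j with
      | 0 => exact hsw ((PySem.Chars.startswith_iff _ _).mpr (by simpa using hj))
      | k + 1 =>
        have : w <:+: cs := (PySem.Chars.isIn_iff_infix w cs).mp
          ((PySem.Chars.exists_prefix_drop_iff_isIn w cs).mp ⟨k, by simpa using hj⟩)
        exact ((PySem.Chars.find_eq_neg_one_iff cs w).mp hmiss) this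
    · rw [if_neg hmiss]
      have h0 : 0 ≤ PySem.Chars.find cs w := by
        have := PySem.Chars.neg_one_le_find cs w; omega
      obtain ⟨hpre, hmin⟩ := PySem.Chars.find_spec h0
      have := find_eq_of (cs := c :: cs) ((PySem.Chars.find cs w).toNat + 1)
        (by simpa using hpre)
        (by
          intro i hi
          match i with
          | 0 =>
            intro hp
            exact hsw ((PySem.Chars.startswith_iff _ _).mpr (by simpa using hp))
          | k + 1 =>
            have hk : k < (PySem.Chars.find cs w).toNat := by omega
            simpa using hmin k hk)
      rw [this]; omega

theorem digitScan_shift (l : List Char) : ∀ (i : Int) (d : Int × Int),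
    digitScan l (i + 1) (d.1 + 1, d.2) =
      ((digitScan l i d).1 + 1, (digitScan l i d).2) := by
  induction l with
  | nil => intro i d; simp [digitScan]
  | cons c rest ih =>
    intro i d
    by_cases hd : PySem.Chars.isdigit c
    · simp [digitScan, hd]
    · simp only [digitScan, hd, Bool.false_eq_true, if_false]
      exact ih (i + 1) d

theorem digitScan_nonneg (l : List Char) : ∀ (i : Int) (d : Int × Int),
    0 ≤ i → 0 ≤ d.1 → 0 ≤ (digitScan l i d).1 := by
  induction l with
  | nil => intro i d hi hd; simpa [digitScan] using hd
  | cons c rest ih =>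
    intro i d hi hd
    by_cases h : PySem.Chars.isdigit c
    · simpa [digitScan, h] using hi
    · simp only [digitScan, h, Bool.false_eq_true, if_false]
      exact ih (i + 1) d (by omega) hd

theorem wordLoop_at_zero (cs : List Char) : ∀ (l : List (List Char × Int)) (v : Int),
    wordLoop cs l (0, v) = (0, v) := by
  intro l
  induction l with
  | nil => intro v; rfl
  | cons p ps ih =>
    intro v
    have hge := PySem.Chars.neg_one_le_find cs p.1
    have hcond : ¬ (PySem.Chars.find cs p.1 ≠ -1 ∧ PySem.Chars.find cs p.1 < (0 : Int)) := by
      rintro ⟨h1, h2⟩; omega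
    simp only [wordLoop, if_neg hcond]
    exact ih v

theorem wordAt_none {suf : List Char} : ∀ {l : List (List Char × Int)},
    wordAt l suf = none → ∀ p ∈ l, PySem.Chars.startswith suf p.1 = false := by
  intro l
  induction l with
  | nil => intro _ p hp; cases hp
  | cons q qs ih =>
    intro h p hp
    by_cases hsw : PySem.Chars.startswith suf q.1
    · simp [wordAt, hsw] at h
    · simp only [wordAt, hsw, Bool.false_eq_true, if_false] at h
      rcases List.mem_cons.mp hp with rfl | hp
      · simpa using hsw
      · exact ih h p hp

theorem wordLoop_found (c : Char) (cs : List Char) :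
    ∀ (l : List (List Char × Int)) (st : Int × Int) (v : Int), 1 ≤ st.1 →
    wordAt l (c :: cs) = some v → wordLoop (c :: cs) l st = (0, v) := by
  intro l
  induction l with
  | nil => intro st v _ h; cases h
  | cons p ps ih =>
    intro st v hst h
    by_cases hsw : PySem.Chars.startswith (c :: cs) p.1
    · have hv : p.2 = v := by simpa [wordAt, hsw] using h
      have hf : PySem.Chars.find (c :: cs) p.1 = 0 := by
        rw [findCons, if_pos hsw]
      simp only [wordLoop, hf]
      rw [if_pos (show (0:Int) ≠ -1 ∧ (0:Int) < st.1 from ⟨by omega, by omega⟩), hv]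
      exact wordLoop_at_zero (c :: cs) ps v
    · have h' : wordAt ps (c :: cs) = some v := by
        simpa [wordAt, hsw] using h
      have hge := PySem.Chars.neg_one_le_find cs p.1
      have hf : PySem.Chars.find (c :: cs) p.1 =
          if PySem.Chars.find cs p.1 = -1 then -1 else PySem.Chars.find cs p.1 + 1 := by
        rw [findCons, if_neg hsw]
      simp only [wordLoop]
      split_ifs with hcond
      · have hne : PySem.Chars.find (c :: cs) p.1 ≠ -1 := hcond.1
        have h1 : 1 ≤ PySem.Chars.find (c :: cs) p.1 := by
          rw [hf] at hne ⊢
          by_cases hm : PySem.Chars.find cs p.1 = -1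
          · simp [hm] at hne
          · rw [if_neg hm]; omega
        exact ih (PySem.Chars.find (c :: cs) p.1, p.2) v h1 h'
      · exact ih st v hst h' 

theorem wordLoop_shift (c : Char) (cs : List Char) :
    ∀ (l : List (List Char × Int)) (st : Int × Int),
    (∀ p ∈ l, PySem.Chars.startswith (c :: cs) p.1 = false) →
    wordLoop (c :: cs) l (st.1 + 1, st.2) =
      ((wordLoop cs l st).1 + 1, (wordLoop cs l st).2) := by
  intro l
  induction l with
  | nil => intro st _; rfl
  | cons p ps ih =>
    intro st hall
    have hsw : PySem.Chars.startswith (c :: cs) p.1 = false := hall p (by simp)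
    have hge := PySem.Chars.neg_one_le_find cs p.1
    have hf : PySem.Chars.find (c :: cs) p.1 =
        if PySem.Chars.find cs p.1 = -1 then -1 else PySem.Chars.find cs p.1 + 1 := by
      rw [findCons, if_neg (by simp [hsw])]
    have htail : ∀ q ∈ ps, PySem.Chars.startswith (c :: cs) q.1 = false := by
      intro q hq; exact hall q (by simp [hq])
    by_cases hm : PySem.Chars.find cs p.1 = -1
    · have hf' : PySem.Chars.find (c :: cs) p.1 = -1 := by rw [hf, if_pos hm]
      have hc1 : ¬ (PySem.Chars.find (c :: cs) p.1 ≠ -1 ∧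
          PySem.Chars.find (c :: cs) p.1 < st.1 + 1) := by
        rintro ⟨h1, _⟩; exact h1 hf'
      have hc2 : ¬ (PySem.Chars.find cs p.1 ≠ -1 ∧ PySem.Chars.find cs p.1 < st.1) := by
        rintro ⟨h1, _⟩; exact h1 hm
      simp only [wordLoop, if_neg hc1, if_neg hc2]
      exact ih st htail
    · have hf' : PySem.Chars.find (c :: cs) p.1 = PySem.Chars.find cs p.1 + 1 := by
        rw [hf, if_neg hm]
      by_cases hlt : PySem.Chars.find cs p.1 < st.1
      · have hc1 : PySem.Chars.find (c :: cs) p.1 ≠ -1 ∧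
            PySem.Chars.find (c :: cs) p.1 < st.1 + 1 := by
          constructor <;> rw [hf'] <;> omega
        have hc2 : PySem.Chars.find cs p.1 ≠ -1 ∧ PySem.Chars.find cs p.1 < st.1 :=
          ⟨hm, hlt⟩
        simp only [wordLoop, if_pos hc1, if_pos hc2]
        have := ih (PySem.Chars.find cs p.1, p.2) htail
        simpa [hf'] using this
      · have hc1 : ¬ (PySem.Chars.find (c :: cs) p.1 ≠ -1 ∧
            PySem.Chars.find (c :: cs) p.1 < st.1 + 1) := by
          rintro ⟨_, h2⟩; rw [hf'] at h2; omega
        have hc2 : ¬ (PySem.Chars.find cs p.1 ≠ -1 ∧ PySem.Chars.find cs p.1 < st.1) := by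
          rintro ⟨_, h2⟩; omega
        simp only [wordLoop, if_neg hc1, if_neg hc2]
        exact ih st htail

theorem main_lemma : ∀ (cs : List Char),
    PySem.Int.toStr (wordLoop cs numbersList (digitScan cs 0 ((cs.length : Int), 0))).2
      = bscan cs := by
  intro cs
  induction cs with
  | nil =>
    simp only [digitScan, List.length_nil, Nat.cast_zero]
    rw [wordLoop_at_zero]
    rfl
  | cons c rest ih =>
    by_cases hd : PySem.Chars.isdigit c
    · simp only [digitScan, hd, if_true, bscan]
      rw [wordLoop_at_zero]
    · have hlen : (((c :: rest).length : Nat) : Int) = ((rest.length : Int) + 1) := by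
        simp
      have hds : digitScan (c :: rest) 0 (((c :: rest).length : Int), 0) =
          ((digitScan rest 0 ((rest.length : Int), 0)).1 + 1,
           (digitScan rest 0 ((rest.length : Int), 0)).2) := by
        simp only [digitScan, hd, Bool.false_eq_true, if_false, hlen]
        have := digitScan_shift rest 0 (((rest.length : Int)), 0)
        simpa using this
      cases hw : wordAt numbersList (c :: rest) with
      | some v =>
        have hpos : 1 ≤ (digitScan (c :: rest) 0 (((c :: rest).length : Int), 0)).1 := by
          rw [hds]
          have := digitScan_nonneg rest 0 (((rest.length : Int)), 0) (by omega)
            (by exact Int.natCast_nonneg _)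
          omega
        rw [wordLoop_found c rest numbersList _ v hpos hw]
        simp only [bscan, hd, Bool.false_eq_true, if_false, hw]
      | none =>
        have hall := wordAt_none hw
        rw [hds, wordLoop_shift c rest numbersList _ hall]
        simp only [bscan, hd, Bool.false_eq_true, if_false, hw]
        exact ih

-- ===== VERDICT (by name: the statement is the Claim_ definition above) =====
theorem getNumForwardPartTwo_spec : Claim_equal_getNumForwardPartTwo := by
  intro s _
  unfold Spec_getNumForwardPartTwo getNumForwardPartTwo getNumForwardPartTwo_alt
  exact main_lemma s.toList
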